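-- pv_equiv track=rewrite | github.com/luelista/haos-hass | hello_world/itf.py | build
-- ===== SOURCE A (Python) =====
-- START = 'NnNn'
--
-- STOP = 'WnN'
--
-- CODES = ('NNWWN', 'WNNNW', 'NWNNW', 'WWNNN', 'NNWNW', 'WNWNN', 'NWWNN', 'NNNWW', 'WNNWN', 'NWNWN')
--
-- def build(code, narrow=2, wide=5):
-- 	data = START
-- 	for i in range(0, len(code), 2):
-- 		bars_digit = int(code[i])
-- 		spaces_digit = int(code[i+1])
-- 		for j in range(5):
-- 			data += CODES[bars_digit][j].upper()
-- 			data += CODES[spaces_digit][j].lower()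
-- 	data += STOP
-- 	raw = ''
-- 	for e in data:
-- 		if e == 'W':
-- 			raw += '1' * wide
-- 		if e == 'w':
-- 			raw += '0' * wide
-- 		if e == 'N':
-- 			raw += '1' * narrow
-- 		if e == 'n':
-- 			raw += '0' * narrow
-- 	return raw
-- ===== SOURCE B (Python) =====
-- START = 'NnNn'
--
-- STOP = 'WnN'
--
-- CODES = ('NNWWN', 'WNNNW', 'NWNNW', 'WWNNN', 'NNWNW', 'WNWNN', 'NWWNN', 'NNNWW', 'WNNWN', 'NWNWN')
--
-- def build(code, narrow=2, wide=5):
-- 	# Precompute, per digit, the five bar runs and five space runs as bit strings,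
-- 	# then emit runs directly: no intermediate symbol string is ever built.
-- 	bar_runs = [['1' * (wide if c == 'W' else narrow) for c in p] for p in CODES]
-- 	space_runs = [['0' * (wide if c == 'W' else narrow) for c in p] for p in CODES]
-- 	parts = ['1' * narrow, '0' * narrow, '1' * narrow, '0' * narrow]  # START = 'NnNn'
-- 	for i in range(0, len(code), 2):
-- 		for bar, space in zip(bar_runs[int(code[i])], space_runs[int(code[i + 1])]):
-- 			parts.append(bar)
-- 			parts.append(space)
-- 	parts.append('1' * wide)    # STOP = 'WnN'
-- 	parts.append('0' * narrow)
-- 	parts.append('1' * narrow)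
-- 	return ''.join(parts)
-- ===== Notes on version B (the rewrite author's own statement) =====
-- stated objective: alternative
-- what changed: B never builds the intermediate N/n/W/w symbol string that A builds and then rescans: it precomputes per-digit bar/space bit-run tables once and emits the bit runs directly in a single pass over the digit pairs, joining them at the end.
import Mathlib
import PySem

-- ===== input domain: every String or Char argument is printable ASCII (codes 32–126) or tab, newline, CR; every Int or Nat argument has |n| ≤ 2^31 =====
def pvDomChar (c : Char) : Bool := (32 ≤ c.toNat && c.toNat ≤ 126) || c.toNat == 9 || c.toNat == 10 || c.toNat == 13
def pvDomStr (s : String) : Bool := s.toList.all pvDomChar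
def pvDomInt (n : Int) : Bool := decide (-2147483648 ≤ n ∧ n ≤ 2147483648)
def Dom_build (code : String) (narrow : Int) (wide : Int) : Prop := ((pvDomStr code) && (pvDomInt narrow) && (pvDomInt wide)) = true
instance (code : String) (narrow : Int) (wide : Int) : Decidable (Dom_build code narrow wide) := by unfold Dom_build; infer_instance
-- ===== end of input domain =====

-- B drops A's intermediate N/n/W/w symbol string: it precomputes per-digit bar/space
-- bit-run tables and emits the bit runs directly in one pass (objective: alternative).

-- ===== PORT A =====
def pvSTART : List Char := ['N', 'n', 'N', 'n']
def pvSTOP : List Char := ['W', 'n', 'N']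
def pvCODES : List (List Char) :=
  [['N','N','W','W','N'], ['W','N','N','N','W'], ['N','W','N','N','W'],
   ['W','W','N','N','N'], ['N','N','W','N','W'], ['W','N','W','N','N'],
   ['N','W','W','N','N'], ['N','N','N','W','W'], ['W','N','N','W','N'],
   ['N','W','N','W','N']]

def build (code : String) (narrow : Int) (wide : Int) : String :=
  let cs := code.toList
  let data := (PySem.List.pyRange 0 cs.length 2).foldl (fun data i =>
    let barsDigit := (PySem.Int.ofChars? [(PySem.List.pyGet? cs i).getD ' ']).getD 0
    let spacesDigit := (PySem.Int.ofChars? [(PySem.List.pyGet? cs (i + 1)).getD ' ']).getD 0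
    (PySem.List.pyRange 0 5 1).foldl (fun data j =>
      (data ++ [PySem.Chars.upperChar ((PySem.List.pyGet? ((PySem.List.pyGet? pvCODES barsDigit).getD []) j).getD ' ')])
        ++ [PySem.Chars.lowerChar ((PySem.List.pyGet? ((PySem.List.pyGet? pvCODES spacesDigit).getD []) j).getD ' ')]) data)
    pvSTART
  let data := data ++ pvSTOP
  let raw := data.foldl (fun raw e =>
    let raw := if e == 'W' then raw ++ PySem.List.pyRepeat ['1'] wide else raw
    let raw := if e == 'w' then raw ++ PySem.List.pyRepeat ['0'] wide else raw
    let raw := if e == 'N' then raw ++ PySem.List.pyRepeat ['1'] narrow else raw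
    if e == 'n' then raw ++ PySem.List.pyRepeat ['0'] narrow else raw) []
  String.mk raw

-- ===== PORT B =====
def build_alt (code : String) (narrow : Int) (wide : Int) : String :=
  let cs := code.toList
  let barRuns := pvCODES.map (fun p => p.map (fun c =>
    if c == 'W' then PySem.List.pyRepeat ['1'] wide else PySem.List.pyRepeat ['1'] narrow))
  let spaceRuns := pvCODES.map (fun p => p.map (fun c =>
    if c == 'W' then PySem.List.pyRepeat ['0'] wide else PySem.List.pyRepeat ['0'] narrow))
  let parts : List (List Char) :=
    [PySem.List.pyRepeat ['1'] narrow, PySem.List.pyRepeat ['0'] narrow,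
     PySem.List.pyRepeat ['1'] narrow, PySem.List.pyRepeat ['0'] narrow]
  let parts := (PySem.List.pyRange 0 cs.length 2).foldl (fun parts i =>
    (List.zip
      ((PySem.List.pyGet? barRuns ((PySem.Int.ofChars? [(PySem.List.pyGet? cs i).getD ' ']).getD 0)).getD [])
      ((PySem.List.pyGet? spaceRuns ((PySem.Int.ofChars? [(PySem.List.pyGet? cs (i + 1)).getD ' ']).getD 0)).getD [])).foldl
      (fun parts bs => (parts ++ [bs.1]) ++ [bs.2]) parts) parts
  let parts := ((parts ++ [PySem.List.pyRepeat ['1'] wide]) ++ [PySem.List.pyRepeat ['0'] narrow])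
    ++ [PySem.List.pyRepeat ['1'] narrow]
  String.mk (PySem.Chars.join [] parts)

-- ===== PRECONDITION & SPEC =====
-- Pre: Python A raises exactly when the code has odd length (IndexError on code[i+1])
-- or contains a non-digit character (ValueError in int()); Pre_ excludes exactly those.
def Pre_build (code : String) (narrow : Int) (wide : Int) : Prop :=
  code.toList.all PySem.Chars.isdigit = true ∧ code.toList.length % 2 = 0
instance (code : String) (narrow : Int) (wide : Int) : Decidable (Pre_build code narrow wide) := by
  unfold Pre_build; infer_instance
def pvWitness_build : String × Int × Int := ("0517", 2, 5)

def Spec_build (code : String) (narrow : Int) (wide : Int) (out : String) : Prop :=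
  out = build_alt code narrow wide
instance (code : String) (narrow : Int) (wide : Int) (out : String) : Decidable (Spec_build code narrow wide out) := by
  unfold Spec_build; infer_instance

-- ===== CLAIM (what is proved, stated in full; the proofs are below) =====
def Claim_equal_build : Prop := ∀ (code : String) (narrow : Int) (wide : Int),
  Dom_build code narrow wide → Pre_build code narrow wide →
  Spec_build code narrow wide (build code narrow wide)

-- ===== LEMMAS AND PROOFS =====

def pvRep (b : Char) (n : Int) : List Char := PySem.List.pyRepeat [b] n

/-- The translation of one symbol char by A's second loop. -/
def pvTransSym (narrow wide : Int) (e : Char) : List Char :=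
  if e = 'W' then pvRep '1' wide
  else if e = 'w' then pvRep '0' wide
  else if e = 'N' then pvRep '1' narrow
  else if e = 'n' then pvRep '0' narrow
  else []

def pvDIG : List Char := ['0','1','2','3','4','5','6','7','8','9']

theorem pv_trans_step (narrow wide : Int) (raw : List Char) (e : Char) :
    (let raw := if e == 'W' then raw ++ PySem.List.pyRepeat ['1'] wide else raw
     let raw := if e == 'w' then raw ++ PySem.List.pyRepeat ['0'] wide else raw
     let raw := if e == 'N' then raw ++ PySem.List.pyRepeat ['1'] narrow else raw
     if e == 'n' then raw ++ PySem.List.pyRepeat ['0'] narrow else raw)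
    = raw ++ pvTransSym narrow wide e := by
  by_cases hW : e = 'W' <;> by_cases hw : e = 'w' <;> by_cases hN : e = 'N' <;>
    by_cases hn : e = 'n' <;>
    simp_all [pvTransSym, pvRep]

theorem pv_trans_eq (narrow wide : Int) (data : List Char) (acc : List Char) :
    data.foldl (fun raw e =>
      let raw := if e == 'W' then raw ++ PySem.List.pyRepeat ['1'] wide else raw
      let raw := if e == 'w' then raw ++ PySem.List.pyRepeat ['0'] wide else raw
      let raw := if e == 'N' then raw ++ PySem.List.pyRepeat ['1'] narrow else raw
      if e == 'n' then raw ++ PySem.List.pyRepeat ['0'] narrow else raw) acc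
    = acc ++ data.flatMap (pvTransSym narrow wide) := by
  rw [PySem.List.foldl_congr_mem _ _ (fun raw e => raw ++ pvTransSym narrow wide e) acc
    (fun acc x _ => pv_trans_step narrow wide acc x)]
  exact PySem.List.foldl_append_eq_flatMap _ _ _

theorem pv_join_nil (ps : List (List Char)) : PySem.Chars.join [] ps = ps.flatten := by
  induction ps with
  | nil => simp [PySem.Chars.join, List.intercalate]
  | cons p ps ih =>
    cases ps with
    | nil => simp [PySem.Chars.join, List.intercalate]
    | cons q qs =>
      simp only [PySem.Chars.join, List.intercalate, List.intersperse] at *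
      simp_all [List.flatten]

theorem pv_pyGet?_map {α β : Type} (xs : List α) (f : α → β) (i : Int) :
    PySem.List.pyGet? (xs.map f) i = (PySem.List.pyGet? xs i).map f := by
  simp [PySem.List.pyGet?]

theorem pv_digit_mem (c : Char) (h : PySem.Chars.isdigit c = true) : c ∈ pvDIG := by
  have h1 : '0' ≤ c ∧ c ≤ '9' := by simpa [PySem.Chars.isdigit] using h
  have h2 : 48 ≤ c.toNat ∧ c.toNat ≤ 57 := by
    rcases h1 with ⟨ha, hb⟩
    constructor
    · exact ha
    · exact hb
  have h3 : c.toNat = 48 ∨ c.toNat = 49 ∨ c.toNat = 50 ∨ c.toNat = 51 ∨ c.toNat = 52 ∨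
      c.toNat = 53 ∨ c.toNat = 54 ∨ c.toNat = 55 ∨ c.toNat = 56 ∨ c.toNat = 57 := by omega
  have hinj : ∀ d : Char, c.toNat = d.toNat → c = d := by
    intro d hd
    apply Char.ext
    exact UInt32.toNat_inj.mp hd
  rcases h3 with h | h | h | h | h | h | h | h | h | h <;>
    [exact (hinj '0' h) ▸ (by decide); exact (hinj '1' h) ▸ (by decide);
     exact (hinj '2' h) ▸ (by decide); exact (hinj '3' h) ▸ (by decide);
     exact (hinj '4' h) ▸ (by decide); exact (hinj '5' h) ▸ (by decide);
     exact (hinj '6' h) ▸ (by decide); exact (hinj '7' h) ▸ (by decide);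
     exact (hinj '8' h) ▸ (by decide); exact (hinj '9' h) ▸ (by decide)]

theorem pv_NW (u : List Char) (h : u.all (fun x => x == 'N' || x == 'W') = true) :
    ∀ x ∈ u, x = 'N' ∨ x = 'W' := by
  intro x hx
  have := List.all_eq_true.mp h x hx
  simpa using this

set_option maxRecDepth 10000 in
theorem pv_code0 : PySem.List.pyGet? pvCODES (0 : Int) = some ['N','N','W','W','N'] := by decide
set_option maxRecDepth 10000 in
theorem pv_code1 : PySem.List.pyGet? pvCODES (1 : Int) = some ['W','N','N','N','W'] := by decide
set_option maxRecDepth 10000 in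
theorem pv_code2 : PySem.List.pyGet? pvCODES (2 : Int) = some ['N','W','N','N','W'] := by decide
set_option maxRecDepth 10000 in
theorem pv_code3 : PySem.List.pyGet? pvCODES (3 : Int) = some ['W','W','N','N','N'] := by decide
set_option maxRecDepth 10000 in
theorem pv_code4 : PySem.List.pyGet? pvCODES (4 : Int) = some ['N','N','W','N','W'] := by decide
set_option maxRecDepth 10000 in
theorem pv_code5 : PySem.List.pyGet? pvCODES (5 : Int) = some ['W','N','W','N','N'] := by decide
set_option maxRecDepth 10000 in
theorem pv_code6 : PySem.List.pyGet? pvCODES (6 : Int) = some ['N','W','W','N','N'] := by decide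
set_option maxRecDepth 10000 in
theorem pv_code7 : PySem.List.pyGet? pvCODES (7 : Int) = some ['N','N','N','W','W'] := by decide
set_option maxRecDepth 10000 in
theorem pv_code8 : PySem.List.pyGet? pvCODES (8 : Int) = some ['W','N','N','W','N'] := by decide
set_option maxRecDepth 10000 in
theorem pv_code9 : PySem.List.pyGet? pvCODES (9 : Int) = some ['N','W','N','W','N'] := by decide

theorem pv_digit_lookup (c : Char) (h : c ∈ pvDIG) :
    ∃ d u, PySem.Int.ofChars? [c] = some d ∧ PySem.List.pyGet? pvCODES d = some u ∧
      u.length = 5 ∧ ∀ x ∈ u, x = 'N' ∨ x = 'W' := by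
  simp only [pvDIG, List.mem_cons, List.not_mem_nil, or_false] at h
  rcases h with rfl|rfl|rfl|rfl|rfl|rfl|rfl|rfl|rfl|rfl
  · exact ⟨0, ['N','N','W','W','N'], by decide, pv_code0, rfl, pv_NW _ (by decide)⟩
  · exact ⟨1, ['W','N','N','N','W'], by decide, pv_code1, rfl, pv_NW _ (by decide)⟩
  · exact ⟨2, ['N','W','N','N','W'], by decide, pv_code2, rfl, pv_NW _ (by decide)⟩
  · exact ⟨3, ['W','W','N','N','N'], by decide, pv_code3, rfl, pv_NW _ (by decide)⟩
  · exact ⟨4, ['N','N','W','N','W'], by decide, pv_code4, rfl, pv_NW _ (by decide)⟩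
  · exact ⟨5, ['W','N','W','N','N'], by decide, pv_code5, rfl, pv_NW _ (by decide)⟩
  · exact ⟨6, ['N','W','W','N','N'], by decide, pv_code6, rfl, pv_NW _ (by decide)⟩
  · exact ⟨7, ['N','N','N','W','W'], by decide, pv_code7, rfl, pv_NW _ (by decide)⟩
  · exact ⟨8, ['W','N','N','W','N'], by decide, pv_code8, rfl, pv_NW _ (by decide)⟩
  · exact ⟨9, ['N','W','N','W','N'], by decide, pv_code9, rfl, pv_NW _ (by decide)⟩

theorem pv_up_eq (narrow wide : Int) (x : Char) (h : x = 'N' ∨ x = 'W') :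
    pvTransSym narrow wide (PySem.Chars.upperChar x)
    = (if x == 'W' then PySem.List.pyRepeat ['1'] wide else PySem.List.pyRepeat ['1'] narrow) := by
  rcases h with rfl | rfl
  · rw [show PySem.Chars.upperChar 'N' = 'N' from by decide]; simp [pvTransSym, pvRep]
  · rw [show PySem.Chars.upperChar 'W' = 'W' from by decide]; simp [pvTransSym, pvRep]

theorem pv_low_eq (narrow wide : Int) (x : Char) (h : x = 'N' ∨ x = 'W') :
    pvTransSym narrow wide (PySem.Chars.lowerChar x)
    = (if x == 'W' then PySem.List.pyRepeat ['0'] wide else PySem.List.pyRepeat ['0'] narrow) := by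
  rcases h with rfl | rfl
  · rw [show PySem.Chars.lowerChar 'N' = 'n' from by decide]; simp [pvTransSym, pvRep]
  · rw [show PySem.Chars.lowerChar 'W' = 'w' from by decide]; simp [pvTransSym, pvRep]

/-- One digit pair: the symbol block A emits, translated, equals the run block B emits. -/
theorem pv_pair (narrow wide : Int) (u v : List Char)
    (hu : u.length = 5) (hv : v.length = 5)
    (hux : ∀ x ∈ u, x = 'N' ∨ x = 'W') (hvx : ∀ x ∈ v, x = 'N' ∨ x = 'W')
    (dA : List Char) (pB : List (List Char)) (hinit : dA.flatMap (pvTransSym narrow wide) = pB.flatten) :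
    ((PySem.List.pyRange 0 5 1).foldl (fun data j =>
        (data ++ [PySem.Chars.upperChar ((PySem.List.pyGet? u j).getD ' ')])
          ++ [PySem.Chars.lowerChar ((PySem.List.pyGet? v j).getD ' ')]) dA).flatMap (pvTransSym narrow wide)
    = ((List.zip
        (u.map (fun c => if c == 'W' then PySem.List.pyRepeat ['1'] wide else PySem.List.pyRepeat ['1'] narrow))
        (v.map (fun c => if c == 'W' then PySem.List.pyRepeat ['0'] wide else PySem.List.pyRepeat ['0'] narrow))).foldl
        (fun parts bs => (parts ++ [bs.1]) ++ [bs.2]) pB).flatten := by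
  match u, hu, v, hv with
  | [u1,u2,u3,u4,u5], _, [v1,v2,v3,v4,v5], _ =>
    have hr : PySem.List.pyRange 0 5 1 = [0,1,2,3,4] := by decide
    rw [hr]
    simp only [List.foldl, List.zip, List.zipWith, List.map]
    have g1 := hux u1 (by simp); have g2 := hux u2 (by simp); have g3 := hux u3 (by simp)
    have g4 := hux u4 (by simp); have g5 := hux u5 (by simp)
    have k1 := hvx v1 (by simp); have k2 := hvx v2 (by simp); have k3 := hvx v3 (by simp)
    have k4 := hvx v4 (by simp); have k5 := hvx v5 (by simp)
    simp only [show ∀ (a b c d e : Char), PySem.List.pyGet? [a,b,c,d,e] 0 = some a from by simp [PySem.List.pyGet?, PySem.List.pyIdx?],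
      show ∀ (a b c d e : Char), PySem.List.pyGet? [a,b,c,d,e] 1 = some b from by simp [PySem.List.pyGet?, PySem.List.pyIdx?],
      show ∀ (a b c d e : Char), PySem.List.pyGet? [a,b,c,d,e] 2 = some c from by simp [PySem.List.pyGet?, PySem.List.pyIdx?],
      show ∀ (a b c d e : Char), PySem.List.pyGet? [a,b,c,d,e] 3 = some d from by simp [PySem.List.pyGet?, PySem.List.pyIdx?],
      show ∀ (a b c d e : Char), PySem.List.pyGet? [a,b,c,d,e] 4 = some e from by simp [PySem.List.pyGet?, PySem.List.pyIdx?],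
      Option.getD_some]
    simp only [List.flatMap_append, hinit, List.flatten_append, List.flatMap_cons,
      List.flatMap_nil, List.flatten_cons, List.flatten_nil,
      pv_up_eq narrow wide _ g1, pv_up_eq narrow wide _ g2, pv_up_eq narrow wide _ g3,
      pv_up_eq narrow wide _ g4, pv_up_eq narrow wide _ g5,
      pv_low_eq narrow wide _ k1, pv_low_eq narrow wide _ k2, pv_low_eq narrow wide _ k3,
      pv_low_eq narrow wide _ k4, pv_low_eq narrow wide _ k5, List.append_nil, List.append_assoc]

theorem pv_start_trans {narrow wide : Int} :
    pvSTART.flatMap (pvTransSym narrow wide)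
    = ([PySem.List.pyRepeat ['1'] narrow, PySem.List.pyRepeat ['0'] narrow,
        PySem.List.pyRepeat ['1'] narrow, PySem.List.pyRepeat ['0'] narrow] : List (List Char)).flatten := by
  simp [pvSTART, pvTransSym, pvRep,
    show ('N':Char) ≠ 'W' from by decide, show ('N':Char) ≠ 'w' from by decide,
    show ('n':Char) ≠ 'W' from by decide, show ('n':Char) ≠ 'w' from by decide,
    show ('n':Char) ≠ 'N' from by decide]

theorem pv_stop_trans {narrow wide : Int} :
    pvSTOP.flatMap (pvTransSym narrow wide)
    = PySem.List.pyRepeat ['1'] wide ++ (PySem.List.pyRepeat ['0'] narrow ++ PySem.List.pyRepeat ['1'] narrow) := by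
  simp [pvSTOP, pvTransSym, pvRep,
    show ('n':Char) ≠ 'W' from by decide, show ('n':Char) ≠ 'w' from by decide,
    show ('n':Char) ≠ 'N' from by decide, show ('N':Char) ≠ 'W' from by decide,
    show ('N':Char) ≠ 'w' from by decide]

/-- The two outer loops, run over the same index list, stay related by flatMap/flatten. -/
theorem pv_outer (narrow wide : Int) (cs : List Char) (L : List Int)
    (hL : ∀ i ∈ L, ∃ b s, PySem.List.pyGet? cs i = some b ∧ PySem.List.pyGet? cs (i + 1) = some s ∧
      b ∈ pvDIG ∧ s ∈ pvDIG)
    (dA : List Char) (pB : List (List Char))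
    (hinit : dA.flatMap (pvTransSym narrow wide) = pB.flatten) :
    (L.foldl (fun data i =>
      let barsDigit := (PySem.Int.ofChars? [(PySem.List.pyGet? cs i).getD ' ']).getD 0
      let spacesDigit := (PySem.Int.ofChars? [(PySem.List.pyGet? cs (i + 1)).getD ' ']).getD 0
      (PySem.List.pyRange 0 5 1).foldl (fun data j =>
        (data ++ [PySem.Chars.upperChar ((PySem.List.pyGet? ((PySem.List.pyGet? pvCODES barsDigit).getD []) j).getD ' ')])
          ++ [PySem.Chars.lowerChar ((PySem.List.pyGet? ((PySem.List.pyGet? pvCODES spacesDigit).getD []) j).getD ' ')]) data)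
      dA).flatMap (pvTransSym narrow wide)
    = (L.foldl (fun parts i =>
      (List.zip
        ((PySem.List.pyGet? (pvCODES.map (fun p => p.map (fun c =>
            if c == 'W' then PySem.List.pyRepeat ['1'] wide else PySem.List.pyRepeat ['1'] narrow)))
          ((PySem.Int.ofChars? [(PySem.List.pyGet? cs i).getD ' ']).getD 0)).getD [])
        ((PySem.List.pyGet? (pvCODES.map (fun p => p.map (fun c =>
            if c == 'W' then PySem.List.pyRepeat ['0'] wide else PySem.List.pyRepeat ['0'] narrow)))
          ((PySem.Int.ofChars? [(PySem.List.pyGet? cs (i + 1)).getD ' ']).getD 0)).getD [])).foldl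
      (fun parts bs => (parts ++ [bs.1]) ++ [bs.2]) parts) pB).flatten := by
  induction L generalizing dA pB with
  | nil => simpa using hinit
  | cons i L ih =>
    obtain ⟨b, s, hb, hs, hbd, hsd⟩ := hL i (by simp)
    obtain ⟨db, ub, hdb, hub, hub5, hubx⟩ := pv_digit_lookup b hbd
    obtain ⟨ds, us, hds, hus, hus5, husx⟩ := pv_digit_lookup s hsd
    simp only [List.foldl_cons]
    refine ih (fun j hj => hL j (by simp [hj])) _ _ ?_
    simp only [hb, hs, Option.getD_some, hdb, hds, pv_pyGet?_map, hub, hus, Option.map_some]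
    exact pv_pair narrow wide ub us hub5 hus5 hubx husx dA pB hinit

theorem pv_index_ok (cs : List Char) (hdig : cs.all PySem.Chars.isdigit = true)
    (heven : cs.length % 2 = 0) :
    ∀ i ∈ PySem.List.pyRange 0 cs.length 2,
      ∃ b s, PySem.List.pyGet? cs i = some b ∧ PySem.List.pyGet? cs (i + 1) = some s ∧
        b ∈ pvDIG ∧ s ∈ pvDIG := by
  intro i hi
  rw [PySem.List.mem_pyRange_iff_of_pos (by norm_num)] at hi
  obtain ⟨h0, hlt, hdvd⟩ := hi
  have h1 : i + 1 < (cs.length : Int) := by omega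
  have hb : PySem.List.pyGet? cs i = some cs[i.toNat] :=
    PySem.List.pyGet?_eq_some_getElem cs h0 (by exact_mod_cast hlt)
  have hs : PySem.List.pyGet? cs (i + 1) = some cs[(i + 1).toNat] :=
    PySem.List.pyGet?_eq_some_getElem cs (by omega) (by exact_mod_cast h1)
  refine ⟨cs[i.toNat], cs[(i + 1).toNat], hb, hs, ?_, ?_⟩
  · exact pv_digit_mem _ (by simpa using List.all_eq_true.mp hdig _ (cs.getElem_mem _))
  · exact pv_digit_mem _ (by simpa using List.all_eq_true.mp hdig _ (cs.getElem_mem _))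

-- ===== VERDICT (by name: the statement is the Claim_ definition above) =====
theorem build_spec : Claim_equal_build := by
  intro code narrow wide _ hpre
  obtain ⟨hdig, heven⟩ := hpre
  unfold Spec_build build build_alt
  simp only []
  have hmain := pv_outer narrow wide code.toList (PySem.List.pyRange 0 code.toList.length 2)
    (pv_index_ok code.toList hdig heven)
    pvSTART
    [PySem.List.pyRepeat ['1'] narrow, PySem.List.pyRepeat ['0'] narrow,
     PySem.List.pyRepeat ['1'] narrow, PySem.List.pyRepeat ['0'] narrow]
    pv_start_trans
  rw [pv_trans_eq, pv_join_nil, List.nil_append, List.flatMap_append, hmain]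
  simp only [List.flatten_append, List.flatten_cons, List.flatten_nil, List.append_nil,
    List.append_assoc, pv_stop_trans]
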